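-- pv_equiv track=rewrite | github.com/vidigummy/python-algorithm | baekjoon/21608.py | make_student_spare_map_dict
-- ===== SOURCE A (Python) =====
-- direction_list = [(-1,0),(1,0),(0,-1),(0,1)]
--
-- def make_student_spare_map_dict(N):
--     student_spare_map = dict()
--     for y in range(N):
--         for x in range(N):
--             cnt = 0
--             for direction in direction_list:
--                 next_y = y+direction[0]
--                 next_x = x+direction[1]
--                 if not next_y < 0 and not next_x < 0 and not next_y >= N and not next_x >= N:
--                     cnt += 1
--                 student_spare_map[(y,x)] = cnt
--     return student_spare_map
-- ===== SOURCE B (Python) =====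
-- def make_student_spare_map_dict(N):
--     # Build-then-patch: every cell starts at 4 (the four directions), then one
--     # pass over the border rows/columns subtracts the off-grid directions.
--     student_spare_map = dict()
--     for y in range(N):
--         for x in range(N):
--             student_spare_map[(y, x)] = 4
--     for i in range(N):
--         student_spare_map[(0, i)] -= 1
--         student_spare_map[(N - 1, i)] -= 1
--         student_spare_map[(i, 0)] -= 1
--         student_spare_map[(i, N - 1)] -= 1
--     return student_spare_map
-- ===== Notes on version B (the rewrite author's own statement) =====
-- stated objective: alternative
-- what changed: Instead of bounds-checking four directions per cell, B initializes every cell's count to 4 and then makes a separate O(N) patch pass over the border rows and columns, decrementing once for each off-grid direction.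
import Mathlib
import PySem

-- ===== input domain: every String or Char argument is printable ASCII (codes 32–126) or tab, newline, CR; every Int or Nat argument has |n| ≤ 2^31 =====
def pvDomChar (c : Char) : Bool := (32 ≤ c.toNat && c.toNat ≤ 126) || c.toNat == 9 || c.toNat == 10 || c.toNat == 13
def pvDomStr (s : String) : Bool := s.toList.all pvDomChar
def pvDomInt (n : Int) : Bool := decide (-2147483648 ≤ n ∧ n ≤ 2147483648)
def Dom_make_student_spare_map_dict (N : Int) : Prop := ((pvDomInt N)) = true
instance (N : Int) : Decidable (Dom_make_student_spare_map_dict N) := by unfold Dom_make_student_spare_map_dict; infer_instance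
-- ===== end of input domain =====

-- B builds the same dict by a different algorithm: every cell's count starts at 4,
-- then a separate O(N) patch pass over the border rows/columns subtracts the
-- off-grid directions (alternative decomposition; same result, same key order).

-- ===== PORT A =====
def pvDirectionList : List (Int × Int) := [(-1, 0), (1, 0), (0, -1), (0, 1)]

def make_student_spare_map_dict (N : Int) : List (Int × Int × Int) :=
  let d : PySem.Dict (Int × Int) Int :=
    (PySem.List.pyRange 0 N 1).foldl (fun d y =>
      (PySem.List.pyRange 0 N 1).foldl (fun d x =>
        -- cnt = 0; for direction in direction_list: …; student_spare_map[(y,x)] = cnt  (inside the loop)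
        (pvDirectionList.foldl (fun (st : Int × PySem.Dict (Int × Int) Int) dir =>
          let next_y := y + dir.1
          let next_x := x + dir.2
          let cnt := if ¬ next_y < 0 ∧ ¬ next_x < 0 ∧ ¬ next_y ≥ N ∧ ¬ next_x ≥ N
                     then st.1 + 1 else st.1
          (cnt, st.2.insert (y, x) cnt)) ((0 : Int), d)).2) d) PySem.Dict.empty
  -- tuple-keyed dict → flat (y, x, cnt) triples, per the type convention
  d.items.map (fun p => (p.1.1, p.1.2, p.2))

-- ===== PORT B =====
def make_student_spare_map_dict_alt (N : Int) : List (Int × Int × Int) :=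
  let d0 : PySem.Dict (Int × Int) Int :=
    (PySem.List.pyRange 0 N 1).foldl (fun d y =>
      (PySem.List.pyRange 0 N 1).foldl (fun d x => d.insert (y, x) 4) d) PySem.Dict.empty
  -- m[k] -= 1: the key is always present (i, 0 and N-1 all lie in range(N) when the
  -- loop runs), so Dict.modify with default 0 computes exactly Python's lookup-then-store.
  let d : PySem.Dict (Int × Int) Int :=
    (PySem.List.pyRange 0 N 1).foldl (fun d i =>
      (((d.modify (0, i) 0 (· - 1)).modify (N - 1, i) 0 (· - 1)).modify
        (i, 0) 0 (· - 1)).modify (i, N - 1) 0 (· - 1)) d0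
  -- tuple-keyed dict → flat (y, x, cnt) triples, per the type convention
  d.items.map (fun p => (p.1.1, p.1.2, p.2))

-- ===== PRECONDITION & SPEC =====
def Spec_make_student_spare_map_dict (N : Int) (out : List (Int × Int × Int)) : Prop := out = make_student_spare_map_dict_alt N
instance (N : Int) (out : List (Int × Int × Int)) : Decidable (Spec_make_student_spare_map_dict N out) := by unfold Spec_make_student_spare_map_dict; infer_instance

-- ===== CLAIM (what is proved, stated in full; the proofs are below) =====
def Claim_equal_make_student_spare_map_dict : Prop := ∀ (N : Int), Dom_make_student_spare_map_dict N → Spec_make_student_spare_map_dict N (make_student_spare_map_dict N)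

-- ===== LEMMAS AND PROOFS =====

def pvCnt (N y x : Int) : Int :=
  (if 0 < y then 1 else 0) + (if y < N - 1 then 1 else 0)
    + (if 0 < x then 1 else 0) + (if x < N - 1 then 1 else 0)
def pvK (N : Int) : List (Int × Int) :=
  (PySem.List.pyRange 0 N 1).flatMap (fun y =>
    (PySem.List.pyRange 0 N 1).map (fun x => (y, x)))
theorem pv_mem_K (N y x : Int) :
    (y, x) ∈ pvK N ↔ (0 ≤ y ∧ y < N) ∧ (0 ≤ x ∧ x < N) := by
  simp [pvK, List.mem_flatMap, PySem.List.mem_pyRange_one, Prod.ext_iff, and_comm]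
theorem pv_nodup_K (N : Int) : (pvK N).Nodup := by
  unfold pvK
  rw [List.nodup_flatMap]
  refine ⟨fun y _ => (PySem.List.nodup_pyRange_one 0 N).map ?_, ?_⟩
  · intro a b h; simpa using h
  · refine List.Pairwise.imp ?_ ((PySem.List.nodup_pyRange_one 0 N))
    intro a b hab p hp hq
    simp only [List.mem_map] at hp hq
    obtain ⟨x1, _, rfl⟩ := hp
    obtain ⟨x2, _, h2⟩ := hq
    exact hab (congrArg Prod.fst h2.symm)
theorem pv_cell_eq (N y x : Int) (hy : 0 ≤ y ∧ y < N) (hx : 0 ≤ x ∧ x < N)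
    (d : PySem.Dict (Int × Int) Int) :
    (pvDirectionList.foldl (fun (st : Int × PySem.Dict (Int × Int) Int) dir =>
        let next_y := y + dir.1
        let next_x := x + dir.2
        let cnt := if ¬ next_y < 0 ∧ ¬ next_x < 0 ∧ ¬ next_y ≥ N ∧ ¬ next_x ≥ N
                   then st.1 + 1 else st.1
        (cnt, st.2.insert (y, x) cnt)) ((0 : Int), d)).2
      = d.insert (y, x) (pvCnt N y x) := by
  simp only [pvDirectionList, pvCnt, List.foldl_cons, List.foldl_nil,
    PySem.Dict.insert_insert_self]
  congr 1
  split_ifs <;> omega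
theorem pv_grid_items (v : Int → Int → Int) (ys xs : List Int)
    (hys : ys.Nodup) (hxs : xs.Nodup) :
    ∀ d : PySem.Dict (Int × Int) Int,
      (∀ y ∈ ys, ∀ x, d.contains (y, x) = false) →
      (ys.foldl (fun d y => xs.foldl (fun d x => d.insert (y, x) (v y x)) d) d).items
        = d.items ++ ys.flatMap (fun y => xs.map (fun x => ((y, x), v y x))) := by
  induction ys with
  | nil => simp
  | cons y ys ih =>
    intro d hd
    simp only [List.foldl_cons, List.flatMap_cons]
    have hfresh : ∀ x ∈ xs, d.contains ((fun x => ((y : Int), (x : Int))) x) = false :=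
      fun x _ => hd y (List.mem_cons_self ..) x
    have hmapnd : (xs.map (fun x => ((y : Int), (x : Int)))).Nodup :=
      hxs.map (fun a b h => by simpa using h)
    have h1 := PySem.Dict.items_foldl_insert_fresh xs (fun x => (y, x)) (fun x => v y x) d hfresh hmapnd
    have hd1 : ∀ y' ∈ ys, ∀ x, ((xs.foldl (fun d x => d.insert (y, x) (v y x)) d).contains (y', x)) = false := by
      intro y' hy' x
      rw [← Bool.not_eq_true, PySem.Dict.contains_iff_mem_keys]
      have hk : (xs.foldl (fun d x => d.insert (y, x) (v y x)) d).keys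
          = d.keys ++ xs.map (fun x => (y, x)) := by
        show (xs.foldl (fun d x => d.insert (y, x) (v y x)) d).items.map Prod.fst = _
        rw [show (xs.foldl (fun d x => d.insert ((y : Int), x) (v y x)) d)
            = (xs.foldl (fun d x => d.insert ((fun x => ((y : Int), (x : Int))) x) ((fun x => v y x) x)) d) from rfl]
        rw [h1]
        simp [PySem.Dict.keys, List.map_append, Function.comp]
      rw [hk]
      simp only [List.mem_append, List.mem_map]
      rintro (hmem | ⟨x', _, hx'⟩)
      · have := hd y' (List.mem_cons_of_mem _ hy') x
        rw [← Bool.not_eq_true, PySem.Dict.contains_iff_mem_keys] at this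
        exact this hmem
      · have : y' = y := congrArg Prod.fst hx'.symm
        exact (List.nodup_cons.mp hys).1 (this ▸ hy')
    rw [ih (List.nodup_cons.mp hys).2 _ hd1, h1]
    simp
theorem pv_modify_getD (d : PySem.Dict (Int × Int) Int) (a b y x : Int) :
    (d.modify (a, b) 0 (· - 1)).getD (y, x) 0
      = d.getD (y, x) 0 - (if y = a ∧ x = b then 1 else 0) := by
  rw [PySem.Dict.getD_modify]
  by_cases h : ((y : Int), (x : Int)) = ((a : Int), (b : Int))
  · obtain ⟨rfl, rfl⟩ := Prod.mk.injEq .. ▸ h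
    simp
  · have : ¬ (y = a ∧ x = b) := by
      intro ⟨h1, h2⟩; exact h (by simp [h1, h2])
    simp [h, this]
theorem pv_patch_getD (N : Int) (l : List Int) :
    ∀ (d : PySem.Dict (Int × Int) Int) (y x : Int),
      ((l.foldl (fun d i =>
          (((d.modify (0, i) 0 (· - 1)).modify (N - 1, i) 0 (· - 1)).modify
            (i, 0) 0 (· - 1)).modify (i, N - 1) 0 (· - 1)) d).getD (y, x) 0)
        = d.getD (y, x) 0
          - (l.countP (fun i => decide (y = 0 ∧ x = i)))
          - (l.countP (fun i => decide (y = N - 1 ∧ x = i)))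
          - (l.countP (fun i => decide (y = i ∧ x = 0)))
          - (l.countP (fun i => decide (y = i ∧ x = N - 1))) := by
  induction l with
  | nil => simp
  | cons i l ih =>
    intro d y x
    simp only [List.foldl_cons]
    rw [ih]
    simp only [pv_modify_getD, List.countP_cons, decide_eq_true_eq]
    push_cast
    split_ifs <;> omega
theorem pv_countP_eq (l : List Int) (hnd : l.Nodup) (x : Int) (hx : x ∈ l)
    (c : Prop) [Decidable c] :
    l.countP (fun i => decide (c ∧ x = i)) = if c then 1 else 0 := by
  by_cases hc : c
  · simp only [hc, if_true]
    have h1 := List.count_eq_one_of_mem hnd hx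
    rw [List.count_eq_countP] at h1
    rw [← h1]
    refine List.countP_congr (fun a _ => ?_)
    by_cases hax : x = a
    · subst hax; simp
    · simp [hax]
      exact fun h => hax h.symm
  · rw [if_neg hc]
    exact List.countP_eq_zero.mpr (fun a _ => by simp [hc])
theorem pv_countP_eq' (l : List Int) (hnd : l.Nodup) (y : Int) (hy : y ∈ l)
    (c : Prop) [Decidable c] :
    l.countP (fun i => decide (y = i ∧ c)) = if c then 1 else 0 := by
  rw [show (fun i => decide (y = i ∧ c)) = (fun i => decide (c ∧ y = i)) from
    funext fun i => by simp [and_comm]]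
  exact pv_countP_eq l hnd y hy c
theorem pv_keys_modify_of_contains (d : PySem.Dict (Int × Int) Int)
    (k : Int × Int) (f : Int → Int) (h : d.contains k = true) :
    (d.modify k 0 f).keys = d.keys := by
  rw [PySem.Dict.keys_modify]
  exact PySem.Dict.keys_insert_of_contains d _ h
theorem pv_patch_keys (N : Int) (l : List Int)
    (hl : ∀ i ∈ l, 0 ≤ i ∧ i < N) :
    ∀ d : PySem.Dict (Int × Int) Int, d.keys = pvK N →
      ((l.foldl (fun d i =>
          (((d.modify (0, i) 0 (· - 1)).modify (N - 1, i) 0 (· - 1)).modify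
            (i, 0) 0 (· - 1)).modify (i, N - 1) 0 (· - 1)) d).keys) = pvK N := by
  induction l with
  | nil => intro d hd; simpa using hd
  | cons i l ih =>
    intro d hd
    obtain ⟨hi0, hiN⟩ := hl i (List.mem_cons_self ..)
    have hN : (0 : Int) < N := by omega
    have step : ∀ (d' : PySem.Dict (Int × Int) Int) (k : Int × Int), d'.keys = pvK N →
        k ∈ pvK N → (d'.modify k 0 (· - 1)).keys = pvK N := by
      intro d' k hd' hk
      rw [pv_keys_modify_of_contains d' k _ ((PySem.Dict.contains_iff_mem_keys d' k).mpr (hd' ▸ hk))]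
      exact hd'
    simp only [List.foldl_cons]
    apply ih (fun j hj => hl j (List.mem_cons_of_mem _ hj))
    apply step
    apply step
    apply step
    apply step
    · exact hd
    · exact (pv_mem_K N 0 i).mpr ⟨⟨le_refl 0, hN⟩, hi0, hiN⟩
    · exact (pv_mem_K N (N - 1) i).mpr ⟨⟨by omega, by omega⟩, hi0, hiN⟩
    · exact (pv_mem_K N i 0).mpr ⟨⟨hi0, hiN⟩, le_refl 0, hN⟩
    · exact (pv_mem_K N i (N - 1)).mpr ⟨⟨hi0, hiN⟩, by omega, by omega⟩

-- A's dict, characterised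
theorem pv_items_A (N : Int) :
    ((PySem.List.pyRange 0 N 1).foldl (fun d y =>
      (PySem.List.pyRange 0 N 1).foldl (fun d x =>
        (pvDirectionList.foldl (fun (st : Int × PySem.Dict (Int × Int) Int) dir =>
          let next_y := y + dir.1
          let next_x := x + dir.2
          let cnt := if ¬ next_y < 0 ∧ ¬ next_x < 0 ∧ ¬ next_y ≥ N ∧ ¬ next_x ≥ N
                     then st.1 + 1 else st.1
          (cnt, st.2.insert (y, x) cnt)) ((0 : Int), d)).2) d) PySem.Dict.empty).items
    = (pvK N).map (fun k => (k, pvCnt N k.1 k.2)) := by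
  have h1 : ((PySem.List.pyRange 0 N 1).foldl (fun d y =>
      (PySem.List.pyRange 0 N 1).foldl (fun d x =>
        (pvDirectionList.foldl (fun (st : Int × PySem.Dict (Int × Int) Int) dir =>
          let next_y := y + dir.1
          let next_x := x + dir.2
          let cnt := if ¬ next_y < 0 ∧ ¬ next_x < 0 ∧ ¬ next_y ≥ N ∧ ¬ next_x ≥ N
                     then st.1 + 1 else st.1
          (cnt, st.2.insert (y, x) cnt)) ((0 : Int), d)).2) d) PySem.Dict.empty)
      = ((PySem.List.pyRange 0 N 1).foldl (fun d y =>
          (PySem.List.pyRange 0 N 1).foldl (fun d x =>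
            d.insert (y, x) (pvCnt N y x)) d) PySem.Dict.empty) := by
    apply PySem.List.foldl_congr_mem
    intro d y hy
    apply PySem.List.foldl_congr_mem
    intro d' x hx
    rw [PySem.List.mem_pyRange_one] at hy hx
    simpa using pv_cell_eq N y x hy hx d'
  rw [h1, pv_grid_items (pvCnt N) _ _ (PySem.List.nodup_pyRange_one 0 N)
    (PySem.List.nodup_pyRange_one 0 N) PySem.Dict.empty
    (fun _ _ _ => PySem.Dict.contains_empty _)]
  simp [pvK, List.map_flatMap, List.map_map, Function.comp_def, PySem.Dict.empty]

theorem pv_items_B (N : Int) :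
    (((PySem.List.pyRange 0 N 1).foldl (fun d i =>
        (((d.modify (0, i) 0 (· - 1)).modify (N - 1, i) 0 (· - 1)).modify
          (i, 0) 0 (· - 1)).modify (i, N - 1) 0 (· - 1))
      ((PySem.List.pyRange 0 N 1).foldl (fun d y =>
        (PySem.List.pyRange 0 N 1).foldl (fun d x => d.insert (y, x) 4) d)
        PySem.Dict.empty)).items)
    = (pvK N).map (fun k => (k, pvCnt N k.1 k.2)) := by
  set d0 : PySem.Dict (Int × Int) Int :=
    (PySem.List.pyRange 0 N 1).foldl (fun d y =>
      (PySem.List.pyRange 0 N 1).foldl (fun d x => d.insert (y, x) 4) d)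
      PySem.Dict.empty with hd0
  set dB : PySem.Dict (Int × Int) Int :=
    (PySem.List.pyRange 0 N 1).foldl (fun d i =>
      (((d.modify (0, i) 0 (· - 1)).modify (N - 1, i) 0 (· - 1)).modify
        (i, 0) 0 (· - 1)).modify (i, N - 1) 0 (· - 1)) d0 with hdB
  have hitems0 : d0.items = (pvK N).map (fun k => (k, (4 : Int))) := by
    rw [hd0, pv_grid_items (fun _ _ => 4) _ _ (PySem.List.nodup_pyRange_one 0 N)
      (PySem.List.nodup_pyRange_one 0 N) PySem.Dict.empty
      (fun _ _ _ => PySem.Dict.contains_empty _)]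
    simp [pvK, List.map_flatMap, List.map_map, Function.comp_def, PySem.Dict.empty]
  have hkeys0 : d0.keys = pvK N := by
    show d0.items.map Prod.fst = _
    rw [hitems0]; simp [Function.comp_def]
  have hkeysB : dB.keys = pvK N :=
    pv_patch_keys N _ (fun i hi => (PySem.List.mem_pyRange_one).mp hi) d0 hkeys0
  have hndB : dB.keys.Nodup := hkeysB ▸ pv_nodup_K N
  rw [PySem.Dict.items_eq_map_keys dB hndB 0, hkeysB]
  apply List.map_congr_left
  rintro ⟨y, x⟩ hk
  obtain ⟨⟨hy0, hyN⟩, hx0, hxN⟩ := (pv_mem_K N y x).mp hk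
  simp only [Prod.mk.injEq, true_and]
  have h4 : d0.getD (y, x) 0 = 4 := by
    apply PySem.Dict.getD_of_mem_items d0 _ (hkeys0 ▸ pv_nodup_K N)
    rw [hitems0]
    exact List.mem_map_of_mem hk
  rw [hdB, pv_patch_getD, h4,
    pv_countP_eq _ (PySem.List.nodup_pyRange_one 0 N) x (PySem.List.mem_pyRange_one.mpr ⟨hx0, hxN⟩) (y = 0),
    pv_countP_eq _ (PySem.List.nodup_pyRange_one 0 N) x (PySem.List.mem_pyRange_one.mpr ⟨hx0, hxN⟩) (y = N - 1),
    pv_countP_eq' _ (PySem.List.nodup_pyRange_one 0 N) y (PySem.List.mem_pyRange_one.mpr ⟨hy0, hyN⟩) (x = 0),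
    pv_countP_eq' _ (PySem.List.nodup_pyRange_one 0 N) y (PySem.List.mem_pyRange_one.mpr ⟨hy0, hyN⟩) (x = N - 1)]
  simp only [pvCnt]
  push_cast
  split_ifs <;> omega

theorem make_student_spare_map_dict_eq (N : Int) :
    make_student_spare_map_dict N = make_student_spare_map_dict_alt N := by
  unfold make_student_spare_map_dict make_student_spare_map_dict_alt
  dsimp only
  rw [pv_items_A, pv_items_B]

-- ===== VERDICT (by name: the statement is the Claim_ definition above) =====
theorem make_student_spare_map_dict_spec : Claim_equal_make_student_spare_map_dict := by
  intro N _
  exact make_student_spare_map_dict_eq N
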